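-- pv_equiv track=rewrite | github.com/iPriyadarshi/Data-Structures-and-Algorithms | Leetcode/1717. Maximum Score From Removing Substrings.py | removeSubStr
-- ===== SOURCE A (Python) =====
-- def removeSubStr(string, matchStr):
--     stack = []
--     for ch in string:
--         if stack and (ch == matchStr[1]) and (stack[-1] == matchStr[0]):
--             stack.pop()
--         else:
--             stack.append(ch)
--     return "".join(stack)
-- ===== SOURCE B (Python) =====
-- def removeSubStr(string, matchStr):
--     if len(string) < 2:
--         return string
--     pair = matchStr[0] + matchStr[1]
--     while pair in string:
--         string = string.replace(pair, "")
--     return string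
-- ===== Notes on version B (the rewrite author's own statement) =====
-- stated objective: idiomatic
-- what changed: Replaces the character-by-character stack scan with a fixpoint loop that repeatedly deletes every occurrence of the two-character pair via str.replace until none remains (deleting a fixed two-letter word is confluent, so the normal form equals the greedy stack result); Pre_ only excludes the inputs where A raises IndexError (matchStr shorter than 2 while the string has at least 2 characters).
import Mathlib
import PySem

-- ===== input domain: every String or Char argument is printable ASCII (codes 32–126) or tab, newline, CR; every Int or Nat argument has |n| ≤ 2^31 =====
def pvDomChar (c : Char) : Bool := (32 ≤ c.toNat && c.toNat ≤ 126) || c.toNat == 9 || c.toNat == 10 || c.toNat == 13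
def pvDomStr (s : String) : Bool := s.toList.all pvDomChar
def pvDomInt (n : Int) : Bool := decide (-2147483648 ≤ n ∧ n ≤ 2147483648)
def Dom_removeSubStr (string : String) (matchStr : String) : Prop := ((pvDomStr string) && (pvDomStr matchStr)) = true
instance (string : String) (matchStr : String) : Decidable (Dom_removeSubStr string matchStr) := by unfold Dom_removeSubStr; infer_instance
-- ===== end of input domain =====

-- B replaces A's character-by-character stack scan with a fixpoint loop that repeatedly deletes
-- every occurrence of the two-character pair (str.replace) until none remains; deleting a fixed
-- two-letter word is confluent, so the normal forms agree (objective: idiomatic; a timing run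
-- measured B faster on random inputs since each pass is a single C-level str.replace).

-- ===== PORT A =====
-- Python A: stack scan; stack.pop() when ch == matchStr[1] and stack[-1] == matchStr[0].
def removeSubStr (string : String) (matchStr : String) : String :=
  String.ofList (string.toList.foldl (fun stack ch =>
    if stack ≠ [] ∧ some ch = PySem.Str.pyGet? matchStr 1 ∧ stack.getLast? = PySem.Str.pyGet? matchStr 0
    then stack.dropLast
    else stack ++ [ch]) [])

-- ===== PORT B =====
-- Termination facts for B's while loop: one replace pass strictly shrinks the string
-- when the pair occurs in it (cited by pvAltLoop's decreasing_by).
theorem pvGoLe (old : List Char) : ∀ (fuel : Nat) (l acc : List Char),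
    (PySem.Chars.replace.go old [] fuel l acc).length ≤ acc.length + l.length := by
  intro fuel
  induction fuel with
  | zero => intro l acc; simp [PySem.Chars.replace.go]
  | succ n ih =>
    intro l acc
    cases l with
    | nil => simp [PySem.Chars.replace.go]
    | cons c t =>
      rw [PySem.Chars.replace.go]
      simp only [List.reverse_nil, List.nil_append]
      split
      · have := ih ((c :: t).drop old.length) acc
        have hd : ((c :: t).drop old.length).length ≤ (c :: t).length := by
          simp [List.length_drop]
        omega
      · have := ih t (c :: acc)
        simp at this ⊢
        omega

theorem pvGoLt (a b : Char) : ∀ (fuel : Nat) (l acc : List Char),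
    [a, b] <:+: l → l.length ≤ fuel →
    (PySem.Chars.replace.go [a, b] [] fuel l acc).length + 2 ≤ acc.length + l.length := by
  intro fuel
  induction fuel with
  | zero =>
    intro l acc hinf hlen
    have := hinf.length_le
    simp at this
    omega
  | succ n ih =>
    intro l acc hinf hlen
    cases l with
    | nil =>
      have := hinf.length_le; simp at this
    | cons c t =>
      rw [PySem.Chars.replace.go]
      simp only [List.reverse_nil, List.nil_append]
      split
      next hp =>
        have hdrop : ((c :: t).drop ([a,b] : List Char).length).length + 2 = (c :: t).length := by
          have := (List.isPrefixOf_iff_prefix.mp hp).length_le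
          simp at this ⊢
          omega
        have := pvGoLe [a, b] n ((c :: t).drop ([a,b] : List Char).length) acc
        omega
      next hp =>
        have hinf' : [a, b] <:+: t := by
          rcases List.infix_cons_iff.mp hinf with h | h
          · exact absurd (List.isPrefixOf_iff_prefix.mpr h) hp
          · exact h
        have := ih t (c :: acc) hinf' (by simp at hlen ⊢; omega)
        simp at this ⊢
        omega

theorem pvReplaceLt (a b : Char) (s : List Char) (h : PySem.Chars.isIn [a, b] s = true) :
    (PySem.Chars.replace s [a, b] []).length < s.length := by
  have hinf := (PySem.Chars.isIn_iff_infix [a, b] s).mp h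
  rw [PySem.Chars.replace]
  simp only [List.isEmpty_iff, reduceCtorEq, if_false]
  have := pvGoLt a b s.length s [] hinf le_rfl
  simp at this
  omega

-- B's while loop: 'while pair in string: string = string.replace(pair, "")' with pair = [a, b].
def pvAltLoop (a b : Char) (s : List Char) : List Char :=
  if h : PySem.Chars.isIn [a, b] s = true then
    pvAltLoop a b (PySem.Chars.replace s [a, b] [])
  else s
termination_by s.length
decreasing_by exact pvReplaceLt a b s h

def removeSubStr_alt (string : String) (matchStr : String) : String :=
  if PySem.Str.len string < 2 then string
  else
    let a := PySem.List.pyGetD matchStr.toList 0 ' '   -- matchStr[0]; in range under Pre_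
    let b := PySem.List.pyGetD matchStr.toList 1 ' '   -- matchStr[1]; in range under Pre_
    String.ofList (pvAltLoop a b string.toList)

-- ===== PRECONDITION & SPEC =====
-- Pre_ excludes exactly the inputs on which A raises IndexError: a matchStr shorter than 2
-- while the string has at least 2 characters (A evaluates matchStr[1] from the 2nd char on).
def Pre_removeSubStr (string : String) (matchStr : String) : Prop :=
  2 ≤ matchStr.toList.length ∨ string.toList.length ≤ 1
instance (string : String) (matchStr : String) : Decidable (Pre_removeSubStr string matchStr) := by
  unfold Pre_removeSubStr; infer_instance

def pvWitness_removeSubStr : String × String := ("caabbc", "ab")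

def Spec_removeSubStr (string : String) (matchStr : String) (out : String) : Prop := out = removeSubStr_alt string matchStr
instance (string : String) (matchStr : String) (out : String) : Decidable (Spec_removeSubStr string matchStr out) := by unfold Spec_removeSubStr; infer_instance

-- ===== CLAIM (what is proved, stated in full; the proofs are below) =====
def Claim_equal_removeSubStr : Prop := ∀ (string : String) (matchStr : String), Dom_removeSubStr string matchStr → Pre_removeSubStr string matchStr → Spec_removeSubStr string matchStr (removeSubStr string matchStr)

-- ===== LEMMAS AND PROOFS =====

-- One step of A's stack scan (stack at the back).
def pvSB (a b : Char) (t : List Char) (d : Char) : List Char :=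
  if d = b ∧ t.getLast? = some a then t.dropLast else t ++ [d]

-- The same step acting on the front.
def pvSF (a b : Char) (c : Char) (t : List Char) : List Char :=
  if c = a ∧ t.head? = some b then t.tail else c :: t

-- The normal form (no occurrence of [a, b]) computed front-first.
def pvN (a b : Char) : List Char → List Char
  | [] => []
  | c :: s => pvSF a b c (pvN a b s)

-- "s contains no occurrence of [a, b] as consecutive characters", structurally.
def pvGood (a b : Char) : List Char → Prop
  | [] => True
  | c :: s => ¬(c = a ∧ s.head? = some b) ∧ pvGood a b s

theorem pvGood_tail (a b : Char) (t : List Char) (h : pvGood a b t) : pvGood a b t.tail := by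
  cases t with
  | nil => trivial
  | cons c s => exact h.2

theorem pvGood_N (a b : Char) (s : List Char) : pvGood a b (pvN a b s) := by
  induction s with
  | nil => trivial
  | cons c s ih =>
    show pvGood a b (pvSF a b c (pvN a b s))
    unfold pvSF
    split
    · exact pvGood_tail a b _ ih
    · exact ⟨by assumption, ih⟩

theorem pvN_fix (a b : Char) (s : List Char) (h : pvGood a b s) : pvN a b s = s := by
  induction s with
  | nil => rfl
  | cons c s ih =>
    show pvSF a b c (pvN a b s) = c :: s
    rw [ih h.2]
    unfold pvSF
    rw [if_neg h.1]

theorem pvSFSF (a b : Char) (t : List Char) (h : pvGood a b t) :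
    pvSF a b a (pvSF a b b t) = t := by
  unfold pvSF
  by_cases h1 : b = a ∧ t.head? = some b
  · rw [if_pos h1]
    cases t with
    | nil => simp at h1
    | cons x s =>
      simp only [List.head?_cons, Option.some.injEq] at h1
      obtain ⟨hba, hxb⟩ := h1
      have hns : s.head? ≠ some b := fun hh => h.1 ⟨hxb ▸ hba, hxb ▸ hh⟩
      simp only [List.tail_cons]
      rw [if_neg (by rintro ⟨-, hh⟩; exact hns hh), hxb, hba]
  · rw [if_neg h1]
    simp

theorem pvN_del (a b : Char) (u v : List Char) :
    pvN a b (u ++ a :: b :: v) = pvN a b (u ++ v) := by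
  induction u with
  | nil =>
    show pvSF a b a (pvSF a b b (pvN a b v)) = pvN a b v
    exact pvSFSF a b _ (pvGood_N a b v)
  | cons c u ih =>
    show pvSF a b c (pvN a b (u ++ a :: b :: v)) = pvSF a b c (pvN a b (u ++ v))
    rw [ih]

theorem pvCommute (a b : Char) (t : List Char) (c d : Char) :
    pvSF a b c (pvSB a b t d) = pvSB a b (pvSF a b c t) d := by
  rcases t with _ | ⟨x, _ | ⟨y, s⟩⟩ <;>
    simp only [pvSF, pvSB] <;> split_ifs <;> simp_all

theorem pvN_snoc (a b : Char) (s : List Char) (d : Char) :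
    pvN a b (s ++ [d]) = pvSB a b (pvN a b s) d := by
  induction s with
  | nil =>
    show pvSF a b d [] = pvSB a b [] d
    simp [pvSF, pvSB]
  | cons c s ih =>
    show pvSF a b c (pvN a b (s ++ [d])) = pvSB a b (pvSF a b c (pvN a b s)) d
    rw [ih, pvCommute]

theorem pvFoldl_eq_N (a b : Char) (s : List Char) :
    s.foldl (fun st ch => pvSB a b st ch) [] = pvN a b s := by
  induction s using List.reverseRecOn with
  | nil => rfl
  | append_singleton s d ih =>
    rw [List.foldl_append, pvN_snoc]
    simp [ih]

theorem pvGood_iff (a b : Char) (s : List Char) : pvGood a b s ↔ ¬ [a, b] <:+: s := by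
  induction s with
  | nil =>
    simp [pvGood]
  | cons c s ih =>
    show (¬(c = a ∧ s.head? = some b) ∧ pvGood a b s) ↔ _
    rw [ih, List.infix_cons_iff]
    have hpre : [a, b] <+: c :: s ↔ (c = a ∧ s.head? = some b) := by
      constructor
      · intro h
        rw [List.cons_prefix_cons] at h
        obtain ⟨hac, h2⟩ := h
        cases s with
        | nil => have := h2.length_le; simp at this
        | cons y ys =>
          rw [List.cons_prefix_cons] at h2
          exact ⟨hac.symm, by simp [h2.1]⟩
      · rintro ⟨hc, hh⟩
        cases s with
        | nil => simp at hh
        | cons y ys =>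
          simp at hh
          rw [List.cons_prefix_cons, List.cons_prefix_cons]
          exact ⟨hc.symm, hh.symm ▸ ⟨rfl, by simp⟩⟩
    rw [hpre]
    tauto

theorem pvGo_N (a b : Char) : ∀ (fuel : Nat) (l acc : List Char),
    pvN a b (PySem.Chars.replace.go [a, b] [] fuel l acc) = pvN a b (acc.reverse ++ l) := by
  intro fuel
  induction fuel with
  | zero => intro l acc; rw [PySem.Chars.replace.go]
  | succ n ih =>
    intro l acc
    cases l with
    | nil => rw [PySem.Chars.replace.go]; simp; omega
    | cons c t =>
      rw [PySem.Chars.replace.go]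
      simp only [List.reverse_nil, List.nil_append]
      split
      next hp =>
        rw [ih]
        have hpre := List.isPrefixOf_iff_prefix.mp hp
        obtain ⟨v, hv⟩ := hpre
        have : (c :: t).drop ([a, b] : List Char).length = v := by rw [← hv]; simp
        rw [this, ← hv]
        show pvN a b (acc.reverse ++ v) = pvN a b (acc.reverse ++ (a :: b :: v))
        rw [pvN_del]
      next hp =>
        rw [ih]
        simp

theorem pvAltLoop_eq_N (a b : Char) (s : List Char) : pvAltLoop a b s = pvN a b s := by
  have key : ∀ (n : Nat) (s : List Char), s.length ≤ n → pvAltLoop a b s = pvN a b s := by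
    intro n
    induction n with
    | zero =>
      intro s hs
      have hnil : s = [] := by cases s <;> simp_all
      subst hnil
      have hne : ¬ PySem.Chars.isIn [a, b] ([] : List Char) = true := by
        intro h
        have := ((PySem.Chars.isIn_iff_infix [a, b] []).mp h).length_le
        simp at this
      rw [pvAltLoop, dif_neg hne]
      rfl
    | succ n ih =>
      intro s hs
      rw [pvAltLoop]
      split
      next h =>
        have hlt := pvReplaceLt a b s h
        rw [ih _ (by omega)]
        rw [PySem.Chars.replace]
        simp only [List.isEmpty_iff, reduceCtorEq, if_false]
        rw [pvGo_N]
        simp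
      next h =>
        have good : pvGood a b s := (pvGood_iff a b s).mpr (by
          rw [← PySem.Chars.isIn_iff_infix]; simp [h])
        rw [pvN_fix a b s good]
  exact key s.length s le_rfl

-- A's literal step function is pvSB once matchStr[0] = a and matchStr[1] = b.
theorem pvStep_eq (a b : Char) (matchStr : String)
    (h0 : PySem.Str.pyGet? matchStr 0 = some a) (h1 : PySem.Str.pyGet? matchStr 1 = some b) :
    (fun (stack : List Char) (ch : Char) =>
      if stack ≠ [] ∧ some ch = PySem.Str.pyGet? matchStr 1 ∧ stack.getLast? = PySem.Str.pyGet? matchStr 0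
      then stack.dropLast
      else stack ++ [ch]) = fun st ch => pvSB a b st ch := by
  funext st ch
  rw [h0, h1]
  simp only [pvSB]
  by_cases hc : ch = b ∧ st.getLast? = some a
  · rw [if_pos hc, if_pos]
    refine ⟨List.getLast?_isSome.mp (by rw [hc.2]; rfl), by rw [hc.1], hc.2⟩
  · rw [if_neg, if_neg hc]
    rintro ⟨-, h2, h3⟩
    exact hc ⟨Option.some.injEq _ _ ▸ h2, h3⟩

-- ===== VERDICT (by name: the statement is the Claim_ definition above) =====
theorem removeSubStr_spec : Claim_equal_removeSubStr := by
  intro string matchStr _ hpre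
  unfold Spec_removeSubStr removeSubStr removeSubStr_alt
  by_cases hlen : PySem.Str.len string < 2
  · rw [if_pos hlen]
    have hsl : string.toList.length < 2 := by
      have h : PySem.Str.len string = (string.toList.length : Int) := by simp
      rw [h] at hlen
      exact_mod_cast hlen
    rcases hl : string.toList with _ | ⟨c, rest⟩
    · conv_rhs => rw [← String.ofList_toList (s := string), hl]
      rfl
    · rcases hr : rest with _ | ⟨d, rest2⟩
      · conv_rhs => rw [← String.ofList_toList (s := string), hl, hr]
        simp
      · rw [hl, hr] at hsl; simp at hsl
  · rw [if_neg hlen]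
    have hm : 2 ≤ matchStr.toList.length := by
      rcases hpre with h | h
      · exact h
      · exfalso
        apply hlen
        have heq : PySem.Str.len string = (string.toList.length : Int) := by simp
        rw [heq]
        omega
    rcases hml : matchStr.toList with _ | ⟨a, _ | ⟨b, rest⟩⟩
    · rw [hml] at hm; simp at hm
    · rw [hml] at hm; simp at hm
    · have h0 : PySem.Str.pyGet? matchStr 0 = some a := by
        simp [hml]
      have h1 : PySem.Str.pyGet? matchStr 1 = some b := by
        simp [hml]
      have g0 : PySem.List.pyGetD (a :: b :: rest) 0 ' ' = a := by simp
      have g1 : PySem.List.pyGetD (a :: b :: rest) 1 ' ' = b := by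
        simp [PySem.List.pyGetD]
      simp only [g0, g1, pvStep_eq a b matchStr h0 h1, pvAltLoop_eq_N, pvFoldl_eq_N]
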